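-- pv_equiv track=rewrite | github.com/weideguo/solve | lib/utils.py | cmd_split
-- ===== SOURCE A (Python) =====
-- def cmd_split(cmd_line, arg_num=0):
--     """
--     按照shell的格式分割命令行
--     cmd_line 原始字符串
--     arg_num  参数个数，0为全部按照空格划分，n为按照空格获取n-1个参数，剩余全部为最后一个
--     """
--     cmd_line=cmd_line.strip()
--     cmd_list=[]
--     temp_str=""
--     for c in cmd_line:
--         if arg_num:
--             if len(cmd_list)>=arg_num:
--                 temp_str += c
--             else:
--                 if c != " ":
--                     temp_str += c
--                 elif temp_str:
--                     cmd_list.append(temp_str)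
--                     temp_str=""
--                 else:
--                     temp_str=""
--
--         else:
--             if c != " ":
--                 temp_str += c
--             elif temp_str:
--                 cmd_list.append(temp_str)
--                 temp_str=""
--             else:
--                 temp_str=""
--
--     if temp_str:
--         cmd_list.append(temp_str)
--     return cmd_list
-- ===== SOURCE B (Python) =====
-- def cmd_split(cmd_line, arg_num=0):
--     parts = cmd_line.strip().split(' ')
--     words = [p for p in parts if p]
--     if arg_num == 0 or len(words) <= arg_num:
--         return words
--     n = 0
--     for i, p in enumerate(parts):
--         if p:
--             n += 1
--             if n == arg_num:
--                 return words[:arg_num] + [' '.join(parts[i + 1:])]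
--     return words
-- ===== Notes on version B (the rewrite author's own statement) =====
-- stated objective: simpler
-- what changed: A's character-by-character state machine (temp buffer, token list, phase switch) is replaced by a single space-split pass: empty fields are dropped to get the tokens, and for positive arg_num the fields after the arg_num-th token are rejoined with single spaces to recover the raw remainder; the split/join work runs in C instead of a per-character Python loop.
-- outside the precondition, e.g. on cmd_split('a b', -1): A returns ['a b'], B returns ['a', 'b']
import Mathlib
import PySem

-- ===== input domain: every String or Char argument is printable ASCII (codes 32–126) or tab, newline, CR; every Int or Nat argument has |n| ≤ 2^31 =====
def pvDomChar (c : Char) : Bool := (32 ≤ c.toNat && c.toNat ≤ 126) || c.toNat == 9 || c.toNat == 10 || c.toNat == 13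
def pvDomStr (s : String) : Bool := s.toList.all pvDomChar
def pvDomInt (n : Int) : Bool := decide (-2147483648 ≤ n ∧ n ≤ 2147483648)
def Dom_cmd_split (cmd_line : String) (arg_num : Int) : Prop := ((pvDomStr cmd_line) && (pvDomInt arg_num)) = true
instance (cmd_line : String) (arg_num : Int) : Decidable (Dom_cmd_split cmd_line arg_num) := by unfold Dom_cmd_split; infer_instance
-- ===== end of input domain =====

-- B re-implements the shell-style split via one split(' ') plus a slice/join for the raw
-- remainder, instead of A's char-by-char state machine; equivalence is proved for arg_num ≥ 0.
-- Strings are ported as List Char (PySem.Chars) per the PySem convention.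

-- ===== PORT A =====
-- one step of A's for-loop; state = (cmd_list, temp_str)
def cmdSplitStepA (argNum : Int) (st : List (List Char) × List Char) (c : Char) :
    List (List Char) × List Char :=
  if argNum ≠ 0 then
    if (st.1.length : Int) ≥ argNum then (st.1, st.2 ++ [c])
    else
      if c ≠ ' ' then (st.1, st.2 ++ [c])
      else if st.2 ≠ [] then (st.1 ++ [st.2], [])
      else (st.1, [])
  else
    if c ≠ ' ' then (st.1, st.2 ++ [c])
    else if st.2 ≠ [] then (st.1 ++ [st.2], [])
    else (st.1, [])

def cmd_split (cmd_line : String) (arg_num : Int) : List String :=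
  let s := (PySem.Str.strip cmd_line).toList
  let st := s.foldl (cmdSplitStepA arg_num) ([], [])
  (if st.2 ≠ [] then st.1 ++ [st.2] else st.1).map String.ofList

-- ===== PORT B =====
-- B's for-loop over enumerate(parts): counts nonempty parts until arg_num, then slices+joins
def cmdSplitScanB (argNum : Int) (words : List (List Char)) :
    List (List Char) → Int → List String
  | [], _ => words.map String.ofList
  | p :: rest, n =>
    if p ≠ [] then
      if n + 1 = argNum then
        (words.take argNum.toNat).map String.ofList ++
          [String.ofList (PySem.Chars.join [' '] rest)]
      else cmdSplitScanB argNum words rest (n + 1)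
    else cmdSplitScanB argNum words rest n

def cmd_split_alt (cmd_line : String) (arg_num : Int) : List String :=
  let parts := PySem.Chars.splitOn (PySem.Str.strip cmd_line).toList [' ']
  let words := parts.filter (· ≠ [])
  if arg_num = 0 ∨ (words.length : Int) ≤ arg_num then words.map String.ofList
  else cmdSplitScanB arg_num words parts 0

-- ===== PRECONDITION & SPEC =====
-- Pre_ restricts to the natural domain arg_num ≥ 0 (A's docstring's "0 = split all, n = n-1 args
-- plus rest"); for negative arg_num A's length test is vacuous and it returns the whole stripped
-- line as one element, a corner outside the function's stated purpose which B does not mimic.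
def Pre_cmd_split (cmd_line : String) (arg_num : Int) : Prop := 0 ≤ arg_num
instance (cmd_line : String) (arg_num : Int) : Decidable (Pre_cmd_split cmd_line arg_num) := by
  unfold Pre_cmd_split; infer_instance
def pvWitness_cmd_split : String × Int := ("ls  -l  /tmp/a b", 2)

def Spec_cmd_split (cmd_line : String) (arg_num : Int) (out : List String) : Prop :=
  out = cmd_split_alt cmd_line arg_num
instance (cmd_line : String) (arg_num : Int) (out : List String) :
    Decidable (Spec_cmd_split cmd_line arg_num out) := by unfold Spec_cmd_split; infer_instance

-- ===== CLAIM (what is proved, stated in full; the proofs are below) =====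
def Claim_equal_cmd_split : Prop := ∀ (cmd_line : String) (arg_num : Int),
  Dom_cmd_split cmd_line arg_num → Pre_cmd_split cmd_line arg_num →
  Spec_cmd_split cmd_line arg_num (cmd_split cmd_line arg_num)

-- ===== LEMMAS AND PROOFS =====

def spRef : List Char → List (List Char)
  | [] => [[]]
  | c :: rest =>
    if c = ' ' then [] :: spRef rest
    else
      match spRef rest with
      | [] => [[c]]
      | t :: ts => (c :: t) :: ts

def consHead (cur : List Char) : List (List Char) → List (List Char)
  | [] => [cur]
  | t :: ts => (cur ++ t) :: ts

def afterTok : Nat → List (List Char) → List (List Char)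
  | _, [] => []
  | k, p :: rest => if p ≠ [] then (if k = 1 then rest else afterTok (k - 1) rest) else afterTok k rest

theorem spRef_ne_nil (s : List Char) : spRef s ≠ [] := by
  cases s with
  | nil => simp [spRef]
  | cons c rest =>
    simp only [spRef]
    split
    · simp
    · split <;> simp

theorem consHead_nil {l : List (List Char)} (h : l ≠ []) : consHead [] l = l := by
  cases l with
  | nil => exact absurd rfl h
  | cons t ts => simp [consHead]

theorem consHead_consHead (a b : List Char) (l : List (List Char)) :
    consHead a (consHead b l) = consHead (a ++ b) l := by
  cases l <;> simp [consHead]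

theorem spRef_cons_ne (c : Char) (rest : List Char) (h : c ≠ ' ') :
    spRef (c :: rest) = consHead [c] (spRef rest) := by
  simp only [spRef, if_neg h]
  cases h' : spRef rest <;> simp [consHead]

theorem spRef_cons_space (rest : List Char) : spRef (' ' :: rest) = [] :: spRef rest := by
  simp [spRef]

theorem join_spRef (s : List Char) : PySem.Chars.join [' '] (spRef s) = s := by
  induction s with
  | nil => exact PySem.Chars.join_singleton _ _
  | cons c rest ih =>
    by_cases hc : c = ' '
    · subst hc
      rw [spRef_cons_space]
      rcases h' : spRef rest with _ | ⟨t, ts⟩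
      · exact absurd h' (spRef_ne_nil rest)
      · rw [h'] at ih
        rw [PySem.Chars.join_cons_cons, ih]
        rfl
    · rw [spRef_cons_ne c rest hc]
      rcases h' : spRef rest with _ | ⟨t, ts⟩
      · exact absurd h' (spRef_ne_nil rest)
      · rw [h'] at ih
        rcases ts with _ | ⟨t2, ts2⟩
        · rw [PySem.Chars.join_singleton] at ih
          show PySem.Chars.join [' '] [c :: t] = c :: rest
          rw [PySem.Chars.join_singleton, ih]
        · show PySem.Chars.join [' '] ((c :: t) :: t2 :: ts2) = c :: rest
          rw [PySem.Chars.join_cons_cons] at ih ⊢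
          rw [← ih]
          rfl

theorem all_space_of_filter_nil {s : List Char}
    (h : (spRef s).filter (· ≠ []) = []) : ∀ c ∈ s, c = ' ' := by
  induction s with
  | nil => simp
  | cons c rest ih =>
    by_cases hc : c = ' '
    · subst hc
      rw [spRef_cons_space] at h
      intro x hx
      rcases List.mem_cons.1 hx with h1 | h1
      · exact h1
      · exact ih (by simpa using h) x h1
    · exfalso
      rw [spRef_cons_ne c rest hc] at h
      rcases h' : spRef rest with _ | ⟨t, ts⟩
      · exact absurd h' (spRef_ne_nil rest)
      · rw [h'] at h
        simp only [consHead] at h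
        simp at h

theorem splitOn_go_space : ∀ (fuel : Nat) (l cur : List Char) (acc : List (List Char)),
    l.length < fuel →
    PySem.Chars.splitOn.go [' '] fuel l cur acc = acc.reverse ++ consHead cur.reverse (spRef l) := by
  intro fuel
  induction fuel with
  | zero => intro l cur acc h; omega
  | succ f ih =>
    intro l cur acc h
    cases l with
    | nil =>
      show (cur.reverse :: acc).reverse = _
      simp [spRef, consHead]
    | cons c rest =>
      by_cases hc : c = ' '
      · subst hc
        have hpre : List.isPrefixOf [' '] (' ' :: rest) = true := by
          simp [List.isPrefixOf]
        show (if List.isPrefixOf [' '] (' ' :: rest) = true then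
            PySem.Chars.splitOn.go [' '] f (List.drop [' '].length (' ' :: rest)) []
              (cur.reverse :: acc)
          else PySem.Chars.splitOn.go [' '] f rest (' ' :: cur) acc) = _
        rw [if_pos hpre]
        simp only [List.length_singleton, List.drop_succ_cons, List.drop_zero]
        rw [ih rest [] (cur.reverse :: acc) (by simp at h; omega)]
        rw [spRef_cons_space]
        rcases h' : spRef rest with _ | ⟨t, ts⟩
        · exact absurd h' (spRef_ne_nil rest)
        · simp [consHead]
      · have hpre : List.isPrefixOf [' '] (c :: rest) = false := by
          simp [List.isPrefixOf]
          intro h'; exact absurd h'.symm hc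
        show (if List.isPrefixOf [' '] (c :: rest) = true then
            PySem.Chars.splitOn.go [' '] f (List.drop [' '].length (c :: rest)) []
              (cur.reverse :: acc)
          else PySem.Chars.splitOn.go [' '] f rest (c :: cur) acc) = _
        rw [hpre]
        simp only [Bool.false_eq_true, if_false]
        rw [ih rest (c :: cur) acc (by simp at h; omega)]
        rw [spRef_cons_ne c rest hc]
        simp [consHead_consHead]

theorem splitOn_space (s : List Char) : PySem.Chars.splitOn s [' '] = spRef s := by
  have h := splitOn_go_space (s.length + 1) s [] [] (by omega)
  simpa [PySem.Chars.splitOn, consHead_nil (spRef_ne_nil s)] using h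

theorem foldl_stepA_full (m : Int) (hm : m ≠ 0) (s : List Char) :
    ∀ (acc : List (List Char)) (cur : List Char), (acc.length : Int) ≥ m →
    s.foldl (cmdSplitStepA m) (acc, cur) = (acc, cur ++ s) := by
  induction s with
  | nil => intro acc cur _; simp
  | cons c rest ih =>
    intro acc cur h
    rw [List.foldl_cons]
    have hstep : cmdSplitStepA m (acc, cur) c = (acc, cur ++ [c]) := by
      simp [cmdSplitStepA, hm, h]
    rw [hstep, ih acc (cur ++ [c]) h]
    simp

def flushA (st : List (List Char) × List Char) : List (List Char) :=
  if st.2 ≠ [] then st.1 ++ [st.2] else st.1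

def noTrailSpace (s : List Char) : Prop := s = [] ∨ s.getLast? ≠ some ' '

theorem noTrailSpace_tail {c : Char} {s : List Char} (h : noTrailSpace (c :: s)) :
    noTrailSpace s := by
  cases s with
  | nil => left; rfl
  | cons d t =>
    right
    rcases h with h | h
    · simp at h
    · simpa [List.getLast?_cons_cons] using h

theorem stepA_char {m : Int} (hm : m ≠ 0) (acc : List (List Char)) (cur : List Char)
    {c : Char} (h : (acc.length : Int) < m) (hc : c ≠ ' ') :
    cmdSplitStepA m (acc, cur) c = (acc, cur ++ [c]) := by
  simp only [cmdSplitStepA]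
  rw [if_pos hm, if_neg (by omega), if_pos hc]

theorem stepA_space_flush {m : Int} (hm : m ≠ 0) (acc : List (List Char)) (cur : List Char)
    (h : (acc.length : Int) < m) (hcur : cur ≠ []) :
    cmdSplitStepA m (acc, cur) ' ' = (acc ++ [cur], []) := by
  simp only [cmdSplitStepA]
  rw [if_pos hm, if_neg (by omega), if_neg (by simp), if_pos hcur]

theorem stepA_space_skip {m : Int} (hm : m ≠ 0) (acc : List (List Char)) (cur : List Char)
    (h : (acc.length : Int) < m) (hcur : cur = []) :
    cmdSplitStepA m (acc, cur) ' ' = (acc, []) := by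
  simp only [cmdSplitStepA]
  rw [if_pos hm, if_neg (by omega), if_neg (by simp), if_neg (by simp [hcur])]

theorem head?_dropWhile_false {p : Char → Bool} {l : List Char} {c : Char}
    (h : (l.dropWhile p).head? = some c) : p c = false := by
  induction l with
  | nil => simp at h
  | cons a t ih =>
    rw [List.dropWhile_cons] at h
    split at h
    · exact ih h
    · rename_i hp
      simp at h
      subst h
      simpa using hp

theorem strip_noTrailSpace (cs : String) : noTrailSpace (PySem.Str.strip cs).toList := by
  rw [PySem.Str.toList_strip]
  show noTrailSpace (PySem.Chars.rstrip (PySem.Chars.lstrip cs.toList))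
  unfold PySem.Chars.rstrip
  rcases h : (List.dropWhile PySem.Chars.isspace (PySem.Chars.lstrip cs.toList).reverse).head?
    with _ | c
  · left
    rw [List.head?_eq_none_iff] at h
    simp [h]
  · right
    rw [List.getLast?_reverse, h]
    intro heq
    have hc : c = ' ' := by simpa using heq
    subst hc
    have := head?_dropWhile_false h
    simp [PySem.Chars.isspace] at this

theorem consHead_cons (cur t : List Char) (ts : List (List Char)) :
    consHead cur (t :: ts) = (cur ++ t) :: ts := rfl

theorem filter_cons_ne {cur : List Char} (h : cur ≠ []) (l : List (List Char)) :
    ((cur :: l).filter (· ≠ [])) = cur :: l.filter (· ≠ []) := by simp [h]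

theorem filter_cons_nil (l : List (List Char)) :
    ((([] : List Char) :: l).filter (· ≠ [])) = l.filter (· ≠ []) := by simp

theorem afterTok_cons_ne {p : List Char} {k : Nat} (hp : p ≠ []) (hk : k ≠ 1)
    (l : List (List Char)) : afterTok k (p :: l) = afterTok (k - 1) l := by
  simp [afterTok, hp, hk]

theorem afterTok_cons_one {p : List Char} (hp : p ≠ []) (l : List (List Char)) :
    afterTok 1 (p :: l) = l := by simp [afterTok, hp]

theorem afterTok_cons_nil (k : Nat) (l : List (List Char)) :
    afterTok k (([] : List Char) :: l) = afterTok k l := by simp [afterTok]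

theorem nil_of_all_space_noTrail {l : List Char} (hn : noTrailSpace l)
    (ha : ∀ c ∈ l, c = ' ') : l = [] := by
  rcases hn with hn | hn
  · exact hn
  · by_contra hne
    apply hn
    rw [List.getLast?_eq_getLast_of_ne_nil hne]
    exact congrArg some (ha _ (List.getLast_mem hne))

theorem filter_nonnil_of_ne {s : List Char} (h : (spRef s).filter (· ≠ []) ≠ []) : s ≠ [] := by
  intro he
  subst he
  simp [spRef] at h

-- main characterisation of A's loop for arg_num = m ≥ 1
theorem foldl_stepA_main (m : Int) (s : List Char) :
    ∀ (acc : List (List Char)) (cur : List Char), (acc.length : Int) < m → noTrailSpace s →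
    flushA (s.foldl (cmdSplitStepA m) (acc, cur)) =
      (if (acc.length : Int) + ((consHead cur (spRef s)).filter (· ≠ [])).length ≤ m
       then acc ++ (consHead cur (spRef s)).filter (· ≠ [])
       else acc ++ ((consHead cur (spRef s)).filter (· ≠ [])).take (m - acc.length).toNat ++
         [PySem.Chars.join [' '] (afterTok (m - acc.length).toNat (consHead cur (spRef s)))]) := by
  induction s with
  | nil =>
    intro acc cur hlt _
    show flushA (acc, cur) = _
    rw [show spRef [] = [[]] from rfl, consHead_cons, List.append_nil]
    by_cases hcur : cur = []
    · subst hcur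
      rw [filter_cons_nil]
      rw [if_pos (by simp; omega)]
      simp [flushA]
    · rw [filter_cons_ne hcur]
      rw [if_pos (by simp; omega)]
      simp [flushA, hcur]
  | cons c rest ih =>
    intro acc cur hlt hs
    have hm0 : m ≠ 0 := by
      have h0 : (0 : Int) ≤ (acc.length : Int) := Int.natCast_nonneg _
      omega
    have hs' := noTrailSpace_tail hs
    rw [List.foldl_cons]
    by_cases hc : c = ' '
    · subst hc
      rw [spRef_cons_space, consHead_cons, List.append_nil]
      by_cases hcur : cur = []
      · subst hcur
        rw [stepA_space_skip hm0 acc [] hlt rfl, ih acc [] hlt hs',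
            consHead_nil (spRef_ne_nil rest), filter_cons_nil, afterTok_cons_nil]
      · by_cases hlt2 : (acc.length : Int) + 1 < m
        · rw [stepA_space_flush hm0 acc cur hlt hcur,
              ih (acc ++ [cur]) [] (by simp; omega) hs',
              consHead_nil (spRef_ne_nil rest), filter_cons_ne hcur]
          by_cases hcond :
              (acc.length : Int) + 1 + (((spRef rest).filter (· ≠ [])).length : Int) ≤ m
          · rw [if_pos (by simp only [List.length_append, List.length_singleton]; push_cast; omega),
                if_pos (by simp only [List.length_cons]; push_cast; omega)]
            simp
          · rw [if_neg (by simp only [List.length_append, List.length_singleton]; push_cast; omega),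
                if_neg (by simp only [List.length_cons]; push_cast; omega)]
            have hlen : ((acc ++ [cur]).length : Int) = (acc.length : Int) + 1 := by
              simp
            rw [hlen]
            have htn : (m - (acc.length : Int)).toNat =
                (m - ((acc.length : Int) + 1)).toNat + 1 := by omega
            rw [htn, List.take_succ_cons, afterTok_cons_ne hcur (by omega) (spRef rest),
                Nat.add_sub_cancel]
            simp
        · have heq : (acc.length : Int) + 1 = m := by omega
          rw [stepA_space_flush hm0 acc cur hlt hcur,
              foldl_stepA_full m hm0 rest (acc ++ [cur]) [] (by simp; omega),
              filter_cons_ne hcur]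
          by_cases hW : (spRef rest).filter (· ≠ []) = []
          · have hrest : rest = [] := nil_of_all_space_noTrail hs' (all_space_of_filter_nil hW)
            subst hrest
            rw [hW]
            rw [if_pos (by simp; omega)]
            simp [flushA, hcur]
          · have hWlen : 0 < ((spRef rest).filter (· ≠ [])).length :=
              List.length_pos_of_ne_nil hW
            have hrest : rest ≠ [] := filter_nonnil_of_ne hW
            rw [if_neg (by simp only [List.length_cons]; push_cast; omega)]
            have ht1 : (m - (acc.length : Int)).toNat = 1 := by omega
            rw [ht1, afterTok_cons_one hcur (spRef rest), join_spRef]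
            simp [flushA, hrest]
    · rw [stepA_char hm0 acc cur hlt hc, ih acc (cur ++ [c]) hlt hs',
          spRef_cons_ne c rest hc, consHead_consHead]

-- A's loop for arg_num = 0 is split-and-drop-empties
theorem foldl_stepA_zero (s : List Char) :
    ∀ (acc : List (List Char)) (cur : List Char),
    flushA (s.foldl (cmdSplitStepA 0) (acc, cur)) =
      acc ++ (consHead cur (spRef s)).filter (· ≠ []) := by
  induction s with
  | nil =>
    intro acc cur
    rw [show spRef [] = [[]] from rfl, consHead_cons, List.append_nil]
    by_cases hcur : cur = []
    · subst hcur
      rw [filter_cons_nil]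
      simp [flushA]
    · rw [filter_cons_ne hcur]
      simp [flushA, hcur]
  | cons c rest ih =>
    intro acc cur
    rw [List.foldl_cons]
    by_cases hc : c = ' '
    · subst hc
      rw [spRef_cons_space, consHead_cons, List.append_nil]
      by_cases hcur : cur = []
      · have e1 : cmdSplitStepA 0 (acc, cur) ' ' = (acc, []) := by
          simp [cmdSplitStepA, hcur]
        subst hcur
        rw [e1, ih acc [], consHead_nil (spRef_ne_nil rest), filter_cons_nil]
      · have e1 : cmdSplitStepA 0 (acc, cur) ' ' = (acc ++ [cur], []) := by
          simp [cmdSplitStepA, hcur]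
        rw [e1, ih (acc ++ [cur]) [], consHead_nil (spRef_ne_nil rest), filter_cons_ne hcur]
        simp
    · have e1 : cmdSplitStepA 0 (acc, cur) c = (acc, cur ++ [c]) := by
        simp [cmdSplitStepA, hc]
      rw [e1, ih acc (cur ++ [c]), spRef_cons_ne c rest hc, consHead_consHead]

-- B's scan loop
theorem scanB_eq (m : Int) (words : List (List Char)) :
    ∀ (parts : List (List Char)) (n : Int), 0 ≤ n → n < m →
    m - n ≤ ((parts.filter (· ≠ [])).length : Int) →
    cmdSplitScanB m words parts n =
      (words.take m.toNat).map String.ofList ++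
        [String.ofList (PySem.Chars.join [' '] (afterTok (m - n).toNat parts))] := by
  intro parts
  induction parts with
  | nil =>
    intro n h0 h1 h2
    simp at h2
    omega
  | cons p rest ih =>
    intro n h0 h1 h2
    by_cases hp : p = []
    · subst hp
      rw [show cmdSplitScanB m words (([] : List Char) :: rest) n =
            cmdSplitScanB m words rest n from by simp [cmdSplitScanB]]
      rw [filter_cons_nil] at h2
      rw [ih n h0 h1 h2, afterTok_cons_nil]
    · rw [filter_cons_ne hp] at h2
      by_cases he : n + 1 = m
      · rw [show cmdSplitScanB m words (p :: rest) n =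
              (words.take m.toNat).map String.ofList ++
                [String.ofList (PySem.Chars.join [' '] rest)] from by
            simp [cmdSplitScanB, hp, he]]
        have ht : (m - n).toNat = 1 := by omega
        rw [ht, afterTok_cons_one hp rest]
      · rw [show cmdSplitScanB m words (p :: rest) n =
              cmdSplitScanB m words rest (n + 1) from by simp [cmdSplitScanB, hp, he]]
        have h2' : m - (n + 1) ≤ (((rest.filter (· ≠ [])).length : Nat) : Int) := by
          simp only [List.length_cons] at h2
          push_cast at h2 ⊢
          omega
        rw [ih (n + 1) (by omega) (by omega) h2']
        have hk1 : (m - n).toNat ≠ 1 := by omega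
        rw [afterTok_cons_ne hp hk1 rest]
        have hsub : (m - n).toNat - 1 = (m - (n + 1)).toNat := by omega
        rw [hsub]

theorem cmd_split_eq_flush (cmd_line : String) (arg_num : Int) :
    cmd_split cmd_line arg_num =
      (flushA ((PySem.Str.strip cmd_line).toList.foldl (cmdSplitStepA arg_num) ([], []))).map
        String.ofList := rfl

theorem cmd_split_alt_eq (cmd_line : String) (arg_num : Int) :
    cmd_split_alt cmd_line arg_num =
      (if arg_num = 0 ∨
          ((((PySem.Chars.splitOn (PySem.Str.strip cmd_line).toList [' ']).filter
              (· ≠ [])).length : Int) ≤ arg_num)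
       then ((PySem.Chars.splitOn (PySem.Str.strip cmd_line).toList [' ']).filter
              (· ≠ [])).map String.ofList
       else cmdSplitScanB arg_num
         ((PySem.Chars.splitOn (PySem.Str.strip cmd_line).toList [' ']).filter (· ≠ []))
         (PySem.Chars.splitOn (PySem.Str.strip cmd_line).toList [' ']) 0) := rfl

-- ===== VERDICT (by name: the statement is the Claim_ definition above) =====
theorem cmd_split_spec : Claim_equal_cmd_split := by
  intro cmd_line arg_num _ hpre
  have hge : (0 : Int) ≤ arg_num := hpre
  show cmd_split cmd_line arg_num = cmd_split_alt cmd_line arg_num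
  rw [cmd_split_eq_flush, cmd_split_alt_eq, splitOn_space]
  by_cases h0 : arg_num = 0
  · subst h0
    rw [if_pos (Or.inl rfl), foldl_stepA_zero, consHead_nil (spRef_ne_nil _)]
    simp
  · by_cases hle :
        (((spRef (PySem.Str.strip cmd_line).toList).filter (· ≠ [])).length : Int) ≤ arg_num
    · rw [if_pos (Or.inr hle)]
      rw [foldl_stepA_main arg_num _ [] [] (by simp; omega) (strip_noTrailSpace cmd_line),
          consHead_nil (spRef_ne_nil _)]
      rw [if_pos (by simp only [List.length_nil, Nat.cast_zero, zero_add]; exact hle)]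
      simp
    · rw [if_neg (by rintro (h | h); exacts [h0 h, hle h])]
      rw [scanB_eq arg_num _ (spRef (PySem.Str.strip cmd_line).toList) 0 le_rfl (by omega)
          (by omega)]
      rw [foldl_stepA_main arg_num _ [] [] (by simp; omega) (strip_noTrailSpace cmd_line),
          consHead_nil (spRef_ne_nil _)]
      rw [if_neg (by simp only [List.length_nil, Nat.cast_zero, zero_add]; exact hle)]
      simp
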